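-- pv_equiv track=rewrite | github.com/JanHolubik/warhammer-content-app | gw_novinky_core.py | pick_best_srcset
-- ===== SOURCE A (Python) =====
-- from typing import Dict, List, Optional, Tuple
--
-- def pick_best_srcset(srcset: str) -> Optional[str]:
--     if not srcset:
--         return None
--     parts = []
--     for p in srcset.split(","):
--         p = p.strip()
--         if not p:
--             continue
--         parts.append(p.split(" ")[0].strip())
--     return parts[-1] if parts else None
-- ===== SOURCE B (Python) =====
-- def pick_best_srcset(srcset: str):
--     for cand in reversed(srcset.split(",")):
--         cand = cand.strip()
--         if cand:
--             return cand.split(" ")[0].strip()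
--     return None
-- ===== Notes on version B (the rewrite author's own statement) =====
-- stated objective: simpler
-- what changed: B scans the comma-separated candidates in reverse and returns at the first non-empty one, instead of building the full list of cleaned URLs and indexing [-1]; the empty-string guard also disappears.
import Mathlib
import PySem

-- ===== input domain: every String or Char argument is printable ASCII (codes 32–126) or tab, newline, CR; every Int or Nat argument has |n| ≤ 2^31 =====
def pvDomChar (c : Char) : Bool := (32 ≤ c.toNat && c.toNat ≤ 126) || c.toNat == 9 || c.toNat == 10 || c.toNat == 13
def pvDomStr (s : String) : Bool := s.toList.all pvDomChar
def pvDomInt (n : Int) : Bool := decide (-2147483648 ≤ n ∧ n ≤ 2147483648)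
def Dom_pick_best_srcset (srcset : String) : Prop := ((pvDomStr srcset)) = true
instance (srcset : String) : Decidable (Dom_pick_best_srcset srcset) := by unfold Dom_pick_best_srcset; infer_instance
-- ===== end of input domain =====

-- B replaces A's build-full-list-then-take-last loop by a reverse scan returning at the first non-empty candidate (simpler, early exit).


-- ===== PORT A =====
-- s.split(sep) with literal non-empty sep: split? is none only for sep = "", so getD is exact here
def pvSplit (s sep : String) : List String := (PySem.Str.split? s sep).getD []

-- cleaned URL of an (already stripped, non-empty) candidate: p.split(" ")[0].strip()
def pvUrlOf (p : String) : String := PySem.Str.strip ((pvSplit p " ").headD "")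

def pick_best_srcset (srcset : String) : Option String :=
  if srcset = "" then none
  else
    let parts := (pvSplit srcset ",").foldl
      (fun acc p =>
        let p := PySem.Str.strip p
        if p = "" then acc else acc ++ [pvUrlOf p]) []
    if parts = [] then none else parts.getLast?

-- ===== PORT B =====
def pvPickRev : List String → Option String
  | [] => none
  | c :: rest =>
    let c := PySem.Str.strip c
    if c = "" then pvPickRev rest else some (pvUrlOf c)

def pick_best_srcset_alt (srcset : String) : Option String :=
  pvPickRev (pvSplit srcset ",").reverse

-- ===== PRECONDITION & SPEC =====
def Spec_pick_best_srcset (srcset : String) (out : Option String) : Prop := out = pick_best_srcset_alt srcset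
instance (srcset : String) (out : Option String) : Decidable (Spec_pick_best_srcset srcset out) := by unfold Spec_pick_best_srcset; infer_instance

-- ===== CLAIM (what is proved, stated in full; the proofs are below) =====
def Claim_equal_pick_best_srcset : Prop := ∀ (srcset : String), Dom_pick_best_srcset srcset → Spec_pick_best_srcset srcset (pick_best_srcset srcset)

-- ===== LEMMAS AND PROOFS =====

-- A's loop step
def pvStep (acc : List String) (p : String) : List String :=
  let p := PySem.Str.strip p
  if p = "" then acc else acc ++ [pvUrlOf p]

theorem pvPickRev_append (xs : List String) (p : String) :
    pvPickRev (xs ++ [p]) =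
      (pvPickRev xs).orElse (fun _ =>
        if PySem.Str.strip p = "" then none else some (pvUrlOf (PySem.Str.strip p))) := by
  induction xs with
  | nil => simp only [List.nil_append, pvPickRev]; split <;> rfl
  | cons c rest ih =>
    simp only [List.cons_append, pvPickRev]
    split
    · exact ih
    · rfl

theorem pvFold_last (l : List String) (acc : List String) :
    (l.foldl pvStep acc).getLast? =
      (pvPickRev l.reverse).orElse (fun _ => acc.getLast?) := by
  induction l generalizing acc with
  | nil => simp [pvPickRev]
  | cons p rest ih =>
    simp only [List.foldl_cons, List.reverse_cons, pvPickRev_append, ih]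
    cases h : pvPickRev rest.reverse with
    | some v => simp [Option.orElse]
    | none =>
      simp only [Option.orElse]
      unfold pvStep
      split <;> simp_all

-- ===== VERDICT =====
theorem pick_best_srcset_spec : Claim_equal_pick_best_srcset := by
  intro srcset _
  unfold Spec_pick_best_srcset pick_best_srcset pick_best_srcset_alt
  by_cases h : srcset = ""
  · subst h; decide
  · simp only [if_neg h]
    have hfold := pvFold_last (pvSplit srcset ",") []
    show (if (pvSplit srcset ",").foldl pvStep [] = [] then none
          else ((pvSplit srcset ",").foldl pvStep []).getLast?) = _
    rw [hfold]
    cases hp : pvPickRev (pvSplit srcset ",").reverse with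
    | some v =>
      simp only [Option.orElse]
      split
      · rename_i he
        rw [he] at hfold; simp [hp, Option.orElse] at hfold
      · rfl
    | none =>
      simp only [Option.orElse]
      split <;> simp_all
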